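-- pv_equiv track=rewrite | github.com/HYUNSIK-JI/Algorithm | 프로그래머스/1/388351. 유연근무제/유연근무제.py | solution
-- ===== SOURCE A (Python) =====
-- def back_startdays(n):
--     return 1 if n >= 7 else n + 1
--
-- def to_minutes(hhmm):
--     return (hhmm // 100) * 60 + (hhmm % 100)
--
-- def solution(schedules, timelogs, startday):
--     answer = 0
--
--     for i in range(len(schedules)):
--         is_check = True
--         startdays = startday
--
--         limit_min = to_minutes(schedules[i]) + 10
--
--         for timelog in timelogs[i]:
--             if startdays >= 6:
--                 startdays = back_startdays(startdays)
--                 continue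
--             if to_minutes(timelog) > limit_min:
--                 is_check = False
--                 break
--             startdays = back_startdays(startdays)
--         if is_check:
--             answer += 1
--
--     return answer
-- ===== SOURCE B (Python) =====
-- def solution(schedules, timelogs, startday):
--     def to_minutes(hhmm):
--         return (hhmm // 100) * 60 + hhmm % 100
--
--     # Closed form of the day counter (next day = 1 if d >= 7 else d + 1): the counter
--     # climbs from startday for k = max(0, 7 - startday) steps, then cycles through 1..7,
--     # so position j is a workday (day < 6) iff
--     #   startday + j < 6          when j <= k, and
--     #   (j - k - 1) % 7 < 5       when j > k.
--     k = max(0, 7 - startday)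
--
--     def is_workday(j):
--         return startday + j < 6 if j <= k else (j - k - 1) % 7 < 5
--
--     # Per employee, aggregate the MAX commute minutes over workday logs (None if there
--     # are none) in a staged pass, then compare each max once against its limit.
--     worst = [max((to_minutes(t) for j, t in enumerate(logs) if is_workday(j)),
--                  default=None)
--              for logs in timelogs]
--     return sum(1 for s, w in zip(schedules, worst)
--                if w is None or w <= to_minutes(s) + 10)
-- ===== Notes on version B (the rewrite author's own statement) =====
-- stated objective: alternative
-- what changed: B replaces A's mutable day counter and break-flag scan by the closed form of the day recurrence (climb for max(0,7-startday) steps, then a mod-7 cycle) and a staged per-employee max aggregate compared once against the limit.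
import Mathlib
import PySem

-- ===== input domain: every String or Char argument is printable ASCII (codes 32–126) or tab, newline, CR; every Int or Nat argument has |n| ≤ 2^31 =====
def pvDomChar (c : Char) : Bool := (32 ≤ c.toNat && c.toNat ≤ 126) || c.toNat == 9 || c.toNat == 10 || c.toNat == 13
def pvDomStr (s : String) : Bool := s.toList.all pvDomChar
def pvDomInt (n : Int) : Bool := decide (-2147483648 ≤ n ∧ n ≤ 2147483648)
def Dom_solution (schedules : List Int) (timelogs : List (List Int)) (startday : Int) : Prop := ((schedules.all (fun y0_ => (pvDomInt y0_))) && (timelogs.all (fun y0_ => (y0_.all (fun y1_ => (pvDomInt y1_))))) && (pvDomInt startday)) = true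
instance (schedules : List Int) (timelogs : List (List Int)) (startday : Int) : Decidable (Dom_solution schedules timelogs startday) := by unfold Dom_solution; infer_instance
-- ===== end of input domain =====

-- B replaces A's mutable day counter by the closed form of its recurrence and A's break-flag
-- scan by a staged per-employee max aggregate compared once (objective: alternative; return value only).

-- ===== PORT A =====
def back_startdays (n : Int) : Int := if n ≥ 7 then 1 else n + 1

def to_minutes (hhmm : Int) : Int := (PySem.Int.floordiv hhmm 100) * 60 + PySem.Int.mod hhmm 100

-- inner 'for timelog in timelogs[i]' loop of A, with its break (false = is_check became False)
def solution_inner (limit : Int) : List Int → Int → Bool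
  | [], _ => true
  | t :: rest, startdays =>
    if startdays ≥ 6 then solution_inner limit rest (back_startdays startdays)
    else if to_minutes t > limit then false
    else solution_inner limit rest (back_startdays startdays)

def solution (schedules : List Int) (timelogs : List (List Int)) (startday : Int) : Int :=
  (PySem.List.pyRange 0 (schedules.length : Int) 1).foldl
    (fun answer i =>
      let limit_min := to_minutes (PySem.List.pyGetD schedules i 0) + 10
      if solution_inner limit_min (PySem.List.pyGetD timelogs i []) startday
      then answer + 1 else answer) 0

-- ===== PORT B =====
-- Source B's nested helper (its own copy, as in Source B)
def to_minutes_b (hhmm : Int) : Int := (PySem.Int.floordiv hhmm 100) * 60 + PySem.Int.mod hhmm 100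

-- Source B's is_workday closure (k = max(0, 7 - startday) is passed in)
def is_workday (startday k j : Int) : Bool :=
  if j ≤ k then decide (startday + j < 6) else decide (PySem.Int.mod (j - k - 1) 7 < 5)

-- Source B's 'max((to_minutes(t) for j, t in enumerate(logs) if is_workday(j)), default=None)'
def worstOf (startday k : Int) (logs : List Int) : Option Int :=
  ((PySem.List.enumerate logs 0).filter (fun p => is_workday startday k p.1)).foldl
    (fun acc p => match acc with
      | none => some (to_minutes_b p.2)
      | some m => some (max m (to_minutes_b p.2))) none

def solution_alt (schedules : List Int) (timelogs : List (List Int)) (startday : Int) : Int :=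
  let k := max 0 (7 - startday)
  let worst := timelogs.map (worstOf startday k)
  (schedules.zip worst).foldl
    (fun c p =>
      if (match p.2 with
          | none => true
          | some w => decide (w ≤ to_minutes_b p.1 + 10))
      then c + 1 else c) 0

-- ===== PRECONDITION & SPEC =====
-- Pre_ excludes exactly the inputs on which A raises IndexError: fewer timelog rows than schedules.
def Pre_solution (schedules : List Int) (timelogs : List (List Int)) (startday : Int) : Prop :=
  schedules.length ≤ timelogs.length
instance (schedules : List Int) (timelogs : List (List Int)) (startday : Int) : Decidable (Pre_solution schedules timelogs startday) := by unfold Pre_solution; infer_instance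

def pvWitness_solution : List Int × List (List Int) × Int := ([900, 930], [[900, 850, 1000, 700, 800], [930]], 3)

def Spec_solution (schedules : List Int) (timelogs : List (List Int)) (startday : Int) (out : Int) : Prop := out = solution_alt schedules timelogs startday
instance (schedules : List Int) (timelogs : List (List Int)) (startday : Int) (out : Int) : Decidable (Spec_solution schedules timelogs startday out) := by unfold Spec_solution; infer_instance

-- ===== CLAIM (what is proved, stated in full; the proofs are below) =====
def Claim_equal_solution : Prop := ∀ (schedules : List Int) (timelogs : List (List Int)) (startday : Int), Dom_solution schedules timelogs startday → Pre_solution schedules timelogs startday → Spec_solution schedules timelogs startday (solution schedules timelogs startday)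

-- ===== LEMMAS AND PROOFS =====

-- A's day counter after j steps from startday s (closed form used by B)
def dayAt (s j : Int) : Int :=
  if j ≤ max 0 (7 - s) then s + j else PySem.Int.mod (j - max 0 (7 - s) - 1) 7 + 1

theorem dayAt_zero (s : Int) : dayAt s 0 = s := by
  unfold dayAt
  rw [if_pos (by omega)]; ring

theorem back_dayAt (s j : Int) (hj : 0 ≤ j) : back_startdays (dayAt s j) = dayAt s (j + 1) := by
  unfold back_startdays dayAt
  rw [PySem.Int.mod_eq_emod_of_pos (by norm_num : (0:Int) < 7),
      PySem.Int.mod_eq_emod_of_pos (by norm_num : (0:Int) < 7)]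
  split_ifs <;> omega

theorem dayAt_lt_six (s j : Int) : (dayAt s j < 6) ↔ is_workday s (max 0 (7 - s)) j = true := by
  unfold dayAt is_workday
  rw [PySem.Int.mod_eq_emod_of_pos (by norm_num : (0:Int) < 7)]
  split_ifs <;> simp <;> omega

-- the per-position condition of A's inner loop, index running from j (helper for the proof)
def okFrom (limit s k : Int) : Int → List Int → Bool
  | _, [] => true
  | j, t :: rest =>
    (if is_workday s k j then decide (to_minutes t ≤ limit) else true)
      && okFrom limit s k (j + 1) rest

-- A's inner loop computes okFrom, with the counter in closed form
theorem inner_eq_okFrom (limit s : Int) (logs : List Int) :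
    ∀ (j : Int), 0 ≤ j →
      solution_inner limit logs (dayAt s j) = okFrom limit s (max 0 (7 - s)) j logs := by
  induction logs with
  | nil => intro j _; simp [solution_inner, okFrom]
  | cons t rest ih =>
    intro j hj
    have hstep := back_dayAt s j hj
    have hlt := dayAt_lt_six s j
    show solution_inner limit (t :: rest) (dayAt s j) = okFrom limit s (max 0 (7 - s)) j (t :: rest)
    unfold solution_inner okFrom
    rw [hstep]
    by_cases hw : is_workday s (max 0 (7 - s)) j = true
    · have hc : ¬ dayAt s j ≥ 6 := by have := hlt.mpr hw; omega
      rw [if_neg hc, if_pos hw]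
      by_cases hf : to_minutes t > limit
      · have hnle : ¬ to_minutes t ≤ limit := by omega
        simp [hf, hnle]
      · have hle : to_minutes t ≤ limit := by omega
        simp only [if_neg hf, decide_eq_true hle, Bool.true_and]
        exact ih (j + 1) (by omega)
    · have hc : dayAt s j ≥ 6 := by by_contra hq; exact hw (hlt.mp (by omega))
      rw [if_pos hc, if_neg hw, Bool.true_and]
      exact ih (j + 1) (by omega)

-- the Option-max fold passes the ≤-limit test iff the accumulator does and all elements do
def optLe (limit : Int) : Option Int → Bool
  | none => true
  | some w => decide (w ≤ limit)

theorem foldMax_le (limit : Int) (l : List Int) : ∀ (acc : Option Int),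
    optLe limit (l.foldl (fun a x => match a with
      | none => some x
      | some m => some (max m x)) acc)
      = (optLe limit acc && l.all (fun x => decide (x ≤ limit))) := by
  induction l with
  | nil => intro acc; simp
  | cons x xs ih =>
    intro acc
    rw [List.foldl_cons, List.all_cons, ih]
    cases acc with
    | none => simp [optLe]
    | some m =>
      simp only [optLe]
      by_cases hm : m ≤ limit <;> by_cases hx : x ≤ limit <;>
        simp [hm, hx]

-- okFrom is the all-≤ test over the filtered enumerated logs
theorem okFrom_eq_all (limit s k : Int) (logs : List Int) : ∀ (j : Int),
    okFrom limit s k j logs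
      = (((PySem.List.enumerate logs j).filter
            (fun p => is_workday s k p.1)).map
          (fun p => to_minutes p.2)).all (fun x => decide (x ≤ limit)) := by
  induction logs with
  | nil => intro j; simp [okFrom, PySem.List.enumerate_nil]
  | cons t rest ih =>
    intro j
    rw [PySem.List.enumerate_cons]
    unfold okFrom
    by_cases h : is_workday s k j = true
    · simp only [List.filter_cons, h, ih (j + 1)]
      simp
    · simp only [if_neg h, List.filter_cons]
      simp only [Bool.not_eq_true] at h
      simp [ih (j + 1)]

-- per-employee: A's inner loop agrees with B's max-aggregate check, any startday
theorem inner_eq_worst (limit startday : Int) (logs : List Int) :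
    solution_inner limit logs startday
      = optLe limit (worstOf startday (max 0 (7 - startday)) logs) := by
  have key := inner_eq_okFrom limit startday logs 0 (by omega)
  rw [dayAt_zero] at key
  have hw : worstOf startday (max 0 (7 - startday)) logs
      = (((PySem.List.enumerate logs 0).filter
            (fun p => is_workday startday (max 0 (7 - startday)) p.1)).map
          (fun p => to_minutes_b p.2)).foldl
        (fun a x => match a with | none => some x | some m => some (max m x)) none := by
    unfold worstOf
    exact (List.foldl_map (f := fun (p : Int × Int) => to_minutes_b p.2)
      (g := fun (a : Option Int) (x : Int) => match a with | none => some x | some m => some (max m x))).symm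
  rw [key, okFrom_eq_all, hw, foldMax_le]
  simp [optLe, to_minutes_b, to_minutes]

-- A's indexed fold over range(len(schedules)) equals a fold over zip(schedules, timelogs)
theorem foldl_pyRange_getD_zip (f : Int → Int × List Int → Int)
    (xs : List Int) (ys : List (List Int)) (hxy : xs.length ≤ ys.length) :
    ∀ (m : Nat) (a : Nat) (init : Int), xs.length - a = m →
    (PySem.List.pyRange (a : Int) (xs.length : Int) 1).foldl
      (fun acc i => f acc (PySem.List.pyGetD xs i 0, PySem.List.pyGetD ys i [])) init
    = ((xs.drop a).zip (ys.drop a)).foldl f init := by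
  intro m
  induction m with
  | zero =>
    intro a init ha
    have h1 : xs.length ≤ a := by omega
    rw [PySem.List.pyRange_one_eq_nil (by exact_mod_cast h1), List.foldl_nil,
        List.drop_eq_nil_of_le h1, List.zip_nil_left, List.foldl_nil]
  | succ m ih =>
    intro a init ha
    have h1 : a < xs.length := by omega
    have h2 : a < ys.length := by omega
    have hcons : PySem.List.pyRange (a : Int) (xs.length : Int) 1
        = (a : Int) :: PySem.List.pyRange ((a : Int) + 1) (xs.length : Int) 1 :=
      PySem.List.pyRange_one_cons (by exact_mod_cast h1)
    rw [hcons, List.foldl_cons]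
    have hx : PySem.List.pyGetD xs (a : Int) 0 = xs[a] := by
      simp [PySem.List.pyGetD_natCast, List.getD_eq_getElem?_getD, List.getElem?_eq_getElem h1]
    have hy : PySem.List.pyGetD ys (a : Int) [] = ys[a] := by
      simp [PySem.List.pyGetD_natCast, List.getD_eq_getElem?_getD, List.getElem?_eq_getElem h2]
    have hxd : xs.drop a = xs[a] :: xs.drop (a + 1) := List.drop_eq_getElem_cons h1
    have hyd : ys.drop a = ys[a] :: ys.drop (a + 1) := List.drop_eq_getElem_cons h2
    rw [hxd, hyd, List.zip_cons_cons, List.foldl_cons, hx, hy]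
    have := ih (a + 1) (f init (xs[a], ys[a])) (by omega)
    rw [show ((a : Int) + 1) = ((a + 1 : Nat) : Int) from by push_cast; ring]
    exact this

-- ===== VERDICT (by name: the statement is the Claim_ definition above) =====
theorem solution_spec : Claim_equal_solution := by
  intro schedules timelogs startday _ hlen
  unfold Spec_solution solution solution_alt
  have key := foldl_pyRange_getD_zip
      (fun acc p => if solution_inner (to_minutes p.1 + 10) p.2 startday then acc + 1 else acc)
      schedules timelogs hlen schedules.length 0 0 (by omega)
  simp only [List.drop_zero] at key
  refine Eq.trans (Eq.trans ?_ key) ?_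
  · rfl
  · simp only [List.zip_map_right, List.foldl_map, Prod.map_fst, Prod.map_snd, id]
    apply PySem.List.foldl_congr_mem
    intro acc p _
    rw [inner_eq_worst _ startday p.2]
    rfl
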